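-- pv_equiv track=rewrite | github.com/JeanCarlosSantacruz/python-projects | examen3.py | obtenerCostoTexto
-- ===== SOURCE A (Python) =====
-- def obtenerCostoTexto (cad,d):
--     valorCad= 0
--     cad= cad.split()
--     for palabra in cad:
--         for clave in d:
--             if palabra== clave:
--                 valorCad+= d[clave]
--     return valorCad
-- ===== SOURCE B (Python) =====
-- def obtenerCostoTexto(cad, d):
--     cnt = {}
--     for w in cad.split():
--         cnt[w] = cnt.get(w, 0) + 1
--     total = 0
--     for clave, valor in d.items():
--         total += valor * cnt.get(clave, 0)
--     return total
-- ===== Notes on version B (the rewrite author's own statement) =====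
-- stated objective: alternative
-- what changed: B builds a word-frequency table of the text once and then makes a single pass over the dictionary entries, accumulating value * count, instead of A's nested scan of every dictionary entry for every word of the text.
import Mathlib
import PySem

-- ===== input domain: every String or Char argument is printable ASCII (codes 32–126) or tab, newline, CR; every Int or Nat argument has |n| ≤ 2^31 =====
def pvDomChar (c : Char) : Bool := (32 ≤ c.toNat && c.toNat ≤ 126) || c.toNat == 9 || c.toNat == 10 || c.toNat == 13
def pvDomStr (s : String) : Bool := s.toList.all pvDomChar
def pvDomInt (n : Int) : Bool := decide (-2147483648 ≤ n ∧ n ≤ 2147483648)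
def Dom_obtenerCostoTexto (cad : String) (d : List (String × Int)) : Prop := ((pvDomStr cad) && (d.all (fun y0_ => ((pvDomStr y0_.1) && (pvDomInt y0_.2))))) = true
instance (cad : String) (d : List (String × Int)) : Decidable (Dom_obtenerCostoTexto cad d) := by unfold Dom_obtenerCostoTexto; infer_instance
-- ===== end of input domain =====

-- B replaces A's nested scan (every dict entry re-scanned for every word of the text) by a
-- word-frequency table built once plus one pass over the dict entries (objective: alternative).

-- ===== PORT A =====
-- d[clave]: dict lookup on the association list (first match; exact under Pre_'s distinct keys)
def pvLookup0 (d : List (String × Int)) (k : String) : Int := (d.lookup k).getD 0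

def obtenerCostoTexto (cad : String) (d : List (String × Int)) : Int :=
  (PySem.Str.split₀ cad).foldl
    (fun valorCad palabra =>
      d.foldl
        (fun acc kv =>
          if palabra == kv.1 then acc + pvLookup0 d kv.1 else acc)
        valorCad)
    0

-- ===== PORT B =====
def obtenerCostoTexto_alt (cad : String) (d : List (String × Int)) : Int :=
  let cnt : PySem.Dict String Int :=
    (PySem.Str.split₀ cad).foldl
      (fun cnt w => PySem.Dict.insert cnt w (PySem.Dict.getD cnt w 0 + 1))
      PySem.Dict.empty
  d.foldl (fun total kv => total + kv.2 * PySem.Dict.getD cnt kv.1 0) 0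

-- ===== PRECONDITION & SPEC =====
-- Pre_ requires the association list's keys to be distinct: the list represents a Python
-- dict, which cannot hold duplicate keys, so no input reaching the Python A is excluded;
-- on duplicate-key lists the ports' first-match behaviour would be a representation artefact.
def Pre_obtenerCostoTexto (cad : String) (d : List (String × Int)) : Prop :=
  (d.map Prod.fst).Nodup
instance (cad : String) (d : List (String × Int)) : Decidable (Pre_obtenerCostoTexto cad d) := by
  unfold Pre_obtenerCostoTexto; infer_instance
def pvWitness_obtenerCostoTexto : String × (List (String × Int)) :=
  ("a b a", [("a", 2), ("b", 3)])

def Spec_obtenerCostoTexto (cad : String) (d : List (String × Int)) (out : Int) : Prop := out = obtenerCostoTexto_alt cad d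
instance (cad : String) (d : List (String × Int)) (out : Int) : Decidable (Spec_obtenerCostoTexto cad d out) := by unfold Spec_obtenerCostoTexto; infer_instance

-- ===== CLAIM (what is proved, stated in full; the proofs are below) =====
def Claim_equal_obtenerCostoTexto : Prop := ∀ (cad : String) (d : List (String × Int)), Dom_obtenerCostoTexto cad d → Pre_obtenerCostoTexto cad d → Spec_obtenerCostoTexto cad d (obtenerCostoTexto cad d)

-- ===== LEMMAS AND PROOFS =====

-- A's inner loop over d adds pvLookup0 d w once per pair whose key equals w.
theorem innerA_eq (w : String) (d d' : List (String × Int)) (acc : Int) :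
    d'.foldl (fun acc kv => if w == kv.1 then acc + pvLookup0 d kv.1 else acc) acc
      = acc + (d'.countP (fun kv => w == kv.1) : Int) * pvLookup0 d w := by
  induction d' generalizing acc with
  | nil => simp
  | cons kv rest ih =>
    obtain ⟨k, v⟩ := kv
    simp only [List.foldl_cons, List.countP_cons, ih]
    by_cases h : w = k
    · subst h; simp; ring
    · simp [h, beq_iff_eq]

theorem lookup0_not_mem (d : List (String × Int)) (w : String)
    (h : w ∉ d.map Prod.fst) : pvLookup0 d w = 0 := by
  induction d with
  | nil => simp [pvLookup0]
  | cons kv rest ih =>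
    obtain ⟨k, v⟩ := kv
    simp only [List.map_cons, List.mem_cons, not_or] at h
    simp only [pvLookup0, List.lookup] at *
    have hb : (w == k) = false := by simp [h.1]
    rw [hb]
    exact ih h.2

-- Under distinct keys, count * lookup collapses to lookup.
theorem countP_mul_lookup0 (d : List (String × Int)) (w : String)
    (hnd : (d.map Prod.fst).Nodup) :
    ((d.countP (fun kv => w == kv.1)) : Int) * pvLookup0 d w = pvLookup0 d w := by
  induction d with
  | nil => simp [pvLookup0]
  | cons kv rest ih =>
    obtain ⟨k, v⟩ := kv
    simp only [List.map_cons, List.nodup_cons] at hnd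
    by_cases h : w = k
    · subst h
      have hc : rest.countP (fun kv' => w == kv'.1) = 0 := by
        rw [List.countP_eq_zero]
        intro p hp hb
        have h2 : w = p.1 := by simpa using hb
        exact hnd.1 (List.mem_map.mpr ⟨p, hp, h2.symm⟩)
      simp [List.countP_cons, hc, pvLookup0, List.lookup]
    · have hb : (w == k) = false := by simp [h]
      have hg : pvLookup0 ((k, v) :: rest) w = pvLookup0 rest w := by
        simp only [pvLookup0, List.lookup, hb]
      simp only [List.countP_cons, hb, cond_false, hg]
      exact ih hnd.2

-- Sum over words of the lookup equals the per-entry value*count sum (distinct keys).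
theorem sum_lookup_eq (d : List (String × Int)) (ws : List String)
    (hnd : (d.map Prod.fst).Nodup) :
    (ws.map (fun w => pvLookup0 d w)).sum
      = (d.map (fun kv => kv.2 * (ws.count kv.1 : Int))).sum := by
  induction d with
  | nil => simp [pvLookup0]
  | cons kv rest ih =>
    obtain ⟨k, v⟩ := kv
    simp only [List.map_cons, List.nodup_cons] at hnd
    have hrest : pvLookup0 rest k = 0 := lookup0_not_mem rest k hnd.1
    have key : ∀ ws' : List String,
        (ws'.map (fun w => pvLookup0 ((k, v) :: rest) w)).sum
          = v * (ws'.count k : Int)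
            + (ws'.map (fun w => pvLookup0 rest w)).sum := by
      intro ws'
      induction ws' with
      | nil => simp
      | cons w tl ihw =>
        by_cases h : w = k
        · subst h
          have hg : pvLookup0 ((w, v) :: rest) w = v := by
            simp [pvLookup0, List.lookup]
          simp only [List.map_cons, List.sum_cons, ihw, List.count_cons_self, hg, hrest]
          push_cast; ring
        · have hb : (w == k) = false := by simp [h]
          have hg : pvLookup0 ((k, v) :: rest) w = pvLookup0 rest w := by
            simp only [pvLookup0, List.lookup, hb]
          simp only [List.map_cons, List.sum_cons, ihw, hg,
            List.count_cons_of_ne (by simpa using h)]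
          ring
    rw [key ws, ih hnd.2]
    simp only [List.map_cons, List.sum_cons]

theorem obtenerCostoTexto_spec : Claim_equal_obtenerCostoTexto := by
  intro cad d _ hnd
  unfold Spec_obtenerCostoTexto obtenerCostoTexto obtenerCostoTexto_alt
  have hA : ∀ (ws : List String) (acc : Int),
      ws.foldl (fun valorCad palabra =>
        d.foldl (fun acc kv => if palabra == kv.1 then acc + pvLookup0 d kv.1 else acc) valorCad) acc
        = acc + (ws.map (fun w => pvLookup0 d w)).sum := by
    intro ws
    induction ws with
    | nil => intro acc; simp
    | cons w tl ih =>
      intro acc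
      rw [List.foldl_cons, innerA_eq, countP_mul_lookup0 d w hnd, ih]
      simp only [List.map_cons, List.sum_cons]
      ring
  rw [hA]
  have hcnt : ∀ k : String,
      PySem.Dict.getD
        ((PySem.Str.split₀ cad).foldl
          (fun cnt w => PySem.Dict.insert cnt w (PySem.Dict.getD cnt w 0 + 1))
          PySem.Dict.empty) k 0
        = ((PySem.Str.split₀ cad).count k : Int) := by
    intro k
    rw [PySem.Dict.getD_foldl_insert_add_one]
    simp
  rw [PySem.List.foldl_add (g := fun kv : String × Int =>
        kv.2 * PySem.Dict.getD
          ((PySem.Str.split₀ cad).foldl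
            (fun cnt w => PySem.Dict.insert cnt w (PySem.Dict.getD cnt w 0 + 1))
            PySem.Dict.empty) kv.1 0)]
  simp only [hcnt]
  rw [sum_lookup_eq d (PySem.Str.split₀ cad) hnd]
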